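-- pv_equiv track=rewrite | github.com/Hondarer/pub_markdown | .md_style_jp/tbx_to_dict.py | build_add_space_pairs
-- ===== SOURCE A (Python) =====
-- def build_add_space_pairs(compounds):
--     """スペース区切りカタカナ複合語から add_space ペアリストを生成する。
--
--     from = スペースを除去した複合語（連結形）
--     to   = スペース区切りの複合語（Microsoft 標準形）
--
--     同じ from に複数の to が存在する場合（分割位置の揺れ）は、
--     スペース数が最少のもの（最も保守的な分割）を採用する。
--
--     処理は長い from から順に行われるため、prefix 衝突は自然に解決される。
--     （add_space は JSON の記載順に適用されるため、長さ降順でソートして出力する）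
--     """
--     from_map = {}  # from_word -> to_word (スペース数最少のものを保持)
--     for compound in compounds:
--         from_word = compound.replace(" ", "")
--         # 同じ from に複数の to: スペース数（分割粒度）が少ない方を優先
--         if from_word not in from_map:
--             from_map[from_word] = compound
--         else:
--             existing = from_map[from_word]
--             if existing.count(" ") > compound.count(" "):
--                 from_map[from_word] = compound
--
--     # from の長さ降順でソート（長い複合語を先に処理してprefixの誤置換を防ぐ）
--     pairs = [{"from": f, "to": t} for f, t in from_map.items()]
--     pairs.sort(key=lambda p: len(p["from"]), reverse=True)
--     return pairs
-- ===== SOURCE B (Python) =====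
-- def build_add_space_pairs(compounds):
--     # Repeated head-group partition: peel off the first compound's stripped key,
--     # pick the fewest-space variant of its group, recurse on the rest. No dict.
--     pairs = []
--     rest = compounds
--     while rest:
--         head, tail = rest[0], rest[1:]
--         f = head.replace(" ", "")
--         same = [c for c in tail if c.replace(" ", "") == f]
--         best = head
--         for c in same:
--             if c.count(" ") < best.count(" "):
--                 best = c
--         pairs.append({"from": f, "to": best})
--         rest = [c for c in tail if c.replace(" ", "") != f]
--     pairs.sort(key=lambda p: len(p["from"]), reverse=True)
--     return pairs
-- ===== Notes on version B (the rewrite author's own statement) =====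
-- stated objective: alternative
-- what changed: A maintains a dict keyed by the stripped word and updates the fewest-space variant incrementally in one fold; B uses no dict at all: it repeatedly partitions the remaining list by the head's stripped key, reducing each peeled-off group to its first fewest-space variant, then sorts.
import Mathlib
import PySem

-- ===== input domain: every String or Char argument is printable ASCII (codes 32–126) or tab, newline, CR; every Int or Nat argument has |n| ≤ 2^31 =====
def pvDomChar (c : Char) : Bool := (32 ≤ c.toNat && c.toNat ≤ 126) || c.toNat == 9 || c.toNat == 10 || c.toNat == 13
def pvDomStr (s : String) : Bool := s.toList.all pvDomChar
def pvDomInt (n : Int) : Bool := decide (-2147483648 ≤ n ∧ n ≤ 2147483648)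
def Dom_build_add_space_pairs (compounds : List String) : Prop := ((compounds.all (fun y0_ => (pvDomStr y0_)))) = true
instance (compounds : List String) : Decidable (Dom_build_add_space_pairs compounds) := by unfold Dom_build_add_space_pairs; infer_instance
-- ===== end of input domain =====

-- B drops A's dict entirely: it repeatedly partitions the remaining list by the head's
-- stripped key and reduces each peeled-off group to its first fewest-space variant
-- (objective: alternative, a genuinely different algorithm; not faster).

-- c.count(" ")
def pvCnt (c : String) : Nat := PySem.Str.count c " "
-- c.replace(" ", "")
def pvStrip (c : String) : String := PySem.Str.replace c " " ""

-- ===== PORT A =====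
-- loop body of A: keep per key the variant with the fewest spaces, first-seen wins ties
def pvStepA (from_map : PySem.Dict String String) (compound : String) : PySem.Dict String String :=
  let from_word := pvStrip compound
  if !(from_map.contains from_word) then
    from_map.insert from_word compound
  else
    let existing := from_map.getD from_word ""   -- key present, default never used
    if pvCnt existing > pvCnt compound then
      from_map.insert from_word compound
    else
      from_map

def build_add_space_pairs (compounds : List String) : List (List (String × String)) :=
  let from_map : PySem.Dict String String := compounds.foldl pvStepA ⟨[]⟩
  let pairs := from_map.items.map (fun ft => [("from", ft.1), ("to", ft.2)])
  -- p["from"]: the key is always present in the two-entry dicts built above, so getD with a dummy default is exact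
  PySem.List.sorted pairs (fun p => PySem.Str.len ((PySem.Dict.mk p).getD "from" "")) true

-- ===== PORT B =====
-- B's while loop: peel off the head's whole group, reduce it, recurse on the others
def pvPairsOf : List String → List (String × String)
  | [] => []
  | head :: tail =>
    let f := pvStrip head
    let same := tail.filter (fun c => pvStrip c == f)
    let best := same.foldl (fun b c => if pvCnt c < pvCnt b then c else b) head
    let others := tail.filter (fun c => pvStrip c != f)
    (f, best) :: pvPairsOf others
termination_by l => l.length
decreasing_by simpa using Nat.lt_succ_of_le (List.length_filter_le _ _)

def build_add_space_pairs_alt (compounds : List String) : List (List (String × String)) :=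
  let pairs := (pvPairsOf compounds).map (fun ft => [("from", ft.1), ("to", ft.2)])
  PySem.List.sorted pairs (fun p => PySem.Str.len ((PySem.Dict.mk p).getD "from" "")) true

-- ===== PRECONDITION & SPEC =====
def Spec_build_add_space_pairs (compounds : List String) (out : List (List (String × String))) : Prop := out = build_add_space_pairs_alt compounds
instance (compounds : List String) (out : List (List (String × String))) : Decidable (Spec_build_add_space_pairs compounds out) := by unfold Spec_build_add_space_pairs; infer_instance

-- ===== CLAIM (what is proved, stated in full; the proofs are below) =====
def Claim_equal_build_add_space_pairs : Prop := ∀ (compounds : List String), Dom_build_add_space_pairs compounds → Spec_build_add_space_pairs compounds (build_add_space_pairs compounds)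

-- ===== LEMMAS AND PROOFS =====

-- B's group reduction, as a fold
def pvBest (b : String) (l : List String) : String :=
  l.foldl (fun b c => if pvCnt c < pvCnt b then c else b) b

lemma pvBest_cons (b c : String) (l : List String) :
    pvBest b (c :: l) = pvBest (if pvCnt c < pvCnt b then c else b) l := rfl

lemma pvUnique_entry (l : List (String × String)) (k : String) (e : String × String)
    (hnd : (l.map Prod.fst).Nodup) (hfind : l.find? (fun p => p.1 == k) = some e) :
    ∀ p ∈ l, p.1 = k → p = e := by
  have he1 : e ∈ l := List.mem_of_find?_eq_some hfind
  have he2 : e.1 = k := by simpa using List.find?_some hfind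
  intro p hp hpk
  exact List.inj_on_of_nodup_map hnd hp he1 (by rw [hpk, he2])

-- items of A's step when the key is already present: pointwise update of the unique entry
lemma pvStepA_items_contains (d : PySem.Dict String String) (c : String)
    (hnd : (d.items.map Prod.fst).Nodup) (hc : d.contains (pvStrip c) = true) :
    (pvStepA d c).items
      = d.items.map (fun q => if q.1 == pvStrip c then (q.1, if pvCnt c < pvCnt q.2 then c else q.2) else q) := by
  have hfind : (d.items.find? (fun p => p.1 == pvStrip c)).isSome := by
    simp only [PySem.Dict.contains, List.any_eq_true] at hc
    exact List.find?_isSome.mpr hc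
  obtain ⟨e, hfind⟩ := Option.isSome_iff_exists.mp hfind
  have he2 : e.1 = pvStrip c := by simpa using List.find?_some hfind
  have huniq := pvUnique_entry d.items (pvStrip c) e hnd hfind
  have hgetD : d.getD (pvStrip c) "" = e.2 := by
    simp [PySem.Dict.getD, PySem.Dict.get?, hfind]
  simp only [pvStepA, hc, Bool.not_true, Bool.false_eq_true, if_false, hgetD, gt_iff_lt]
  by_cases hlt : pvCnt c < pvCnt e.2
  · simp only [hlt, if_true, PySem.Dict.insert, hc]
    refine List.map_congr_left (fun q hq => ?_)
    by_cases hqk : (q.1 == pvStrip c) = true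
    · have hqe : q = e := huniq q hq (eq_of_beq hqk)
      subst hqe
      simp [hlt, eq_of_beq hqk]
    · simp [hqk]
  · simp only [hlt, if_false]
    conv_lhs => rw [← List.map_id d.items]
    refine List.map_congr_left (fun q hq => ?_)
    by_cases hqk : (q.1 == pvStrip c) = true
    · have hqe : q = e := huniq q hq (eq_of_beq hqk)
      subst hqe
      simp [hqk, hlt]
    · simp [hqk]

lemma pvStepA_items_new (d : PySem.Dict String String) (c : String)
    (hc : d.contains (pvStrip c) = false) :
    (pvStepA d c).items = d.items ++ [(pvStrip c, c)] := by
  simp [pvStepA, hc, PySem.Dict.insert]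

lemma pvStepA_keys_contains (d : PySem.Dict String String) (c : String)
    (hnd : (d.items.map Prod.fst).Nodup) (hc : d.contains (pvStrip c) = true) :
    (pvStepA d c).items.map Prod.fst = d.items.map Prod.fst := by
  rw [pvStepA_items_contains d c hnd hc, List.map_map]
  exact List.map_congr_left (fun q hq => by dsimp only [Function.comp]; split <;> rfl)

lemma pvContains_keys (d : PySem.Dict String String) (k : String) :
    d.contains k = (d.items.map Prod.fst).any (fun a => a == k) := by
  rw [List.any_map]
  rfl

lemma pvStepA_contains_same (d : PySem.Dict String String) (c k : String)
    (hnd : (d.items.map Prod.fst).Nodup) (hc : d.contains (pvStrip c) = true) :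
    (pvStepA d c).contains k = d.contains k := by
  rw [pvContains_keys, pvContains_keys, pvStepA_keys_contains d c hnd hc]

lemma pvStepA_contains_new (d : PySem.Dict String String) (c k : String)
    (hc : d.contains (pvStrip c) = false) :
    (pvStepA d c).contains k = (d.contains k || (k == pvStrip c)) := by
  have h : (pvStepA d c).items = d.items ++ [(pvStrip c, c)] := pvStepA_items_new d c hc
  rw [pvContains_keys, h, List.map_append, List.any_append, ← pvContains_keys]
  simp only [List.map_cons, List.map_nil, List.any_cons, List.any_nil, Bool.or_false]
  congr 1
  simp [eq_comm]

lemma pvStepA_nodup (d : PySem.Dict String String) (c : String)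
    (hnd : (d.items.map Prod.fst).Nodup) :
    ((pvStepA d c).items.map Prod.fst).Nodup := by
  by_cases hc : d.contains (pvStrip c) = true
  · rw [pvStepA_keys_contains d c hnd hc]; exact hnd
  · rw [pvStepA_items_new d c (by simpa using hc)]
    simp only [List.map_append, List.map_cons, List.map_nil]
    refine List.Nodup.append hnd (List.nodup_singleton _) ?_
    intro a ha hb
    simp only [List.mem_singleton] at hb
    subst hb
    rw [Bool.not_eq_true, pvContains_keys] at hc
    rw [List.any_eq_false] at hc
    exact absurd (by simp : (pvStrip c == pvStrip c) = true) (hc _ ha)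

-- main invariant: the dict fold's items are the already-present keys, each reduced
-- over its remaining matches, followed by B's head-group partition of the unseen rest
lemma pvFold_items (cs : List String) (d : PySem.Dict String String)
    (hnd : (d.items.map Prod.fst).Nodup) :
    (cs.foldl pvStepA d).items
      = d.items.map (fun kv => (kv.1, pvBest kv.2 (cs.filter (fun x => pvStrip x == kv.1))))
        ++ pvPairsOf (cs.filter (fun c => !(d.contains (pvStrip c)))) := by
  induction cs generalizing d with
  | nil => simp [pvPairsOf, pvBest]
  | cons c cs ih =>
    by_cases hc : d.contains (pvStrip c) = true
    · rw [List.foldl_cons, ih (pvStepA d c) (pvStepA_nodup d c hnd),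
        pvStepA_items_contains d c hnd hc, List.map_map]
      congr 1
      · refine List.map_congr_left (fun q hq => ?_)
        dsimp only [Function.comp]
        by_cases hqk : (q.1 == pvStrip c) = true
        · have hq1 : q.1 = pvStrip c := eq_of_beq hqk
          simp only [List.filter_cons, hq1, beq_self_eq_true, if_true, pvBest_cons]
        · have hcq : (pvStrip c == q.1) = false := by
            rw [beq_eq_false_iff_ne]
            intro h
            exact hqk (by simp [← h])
          simp [hqk, hcq]
      · refine congrArg pvPairsOf ?_
        have heq : cs.filter (fun x => !((pvStepA d c).contains (pvStrip x)))
            = cs.filter (fun x => !(d.contains (pvStrip x))) :=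
          List.filter_congr (fun x _ => by rw [pvStepA_contains_same d c (pvStrip x) hnd hc])
        rw [heq, List.filter_cons, if_neg (by simp [hc])]
    · rw [List.foldl_cons, ih (pvStepA d c) (pvStepA_nodup d c hnd),
        pvStepA_items_new d c (by simpa using hc), List.map_append]
      have hrest : (c :: cs).filter (fun x => !(d.contains (pvStrip x)))
          = c :: cs.filter (fun x => !(d.contains (pvStrip x))) := by
        simp [hc]
      rw [hrest]
      rw [show pvPairsOf (c :: cs.filter (fun x => !(d.contains (pvStrip x))))
          = (pvStrip c,
              pvBest c ((cs.filter (fun x => !(d.contains (pvStrip x)))).filter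
                (fun x => pvStrip x == pvStrip c)))
            :: pvPairsOf ((cs.filter (fun x => !(d.contains (pvStrip x)))).filter
                (fun x => pvStrip x != pvStrip c)) from by
        rw [pvPairsOf]; rfl]
      rw [List.append_assoc]
      congr 1
      · refine List.map_congr_left (fun q hq => ?_)
        have hq1 : (pvStrip c == q.1) = false := by
          rw [beq_eq_false_iff_ne]
          intro h
          rw [Bool.not_eq_true, pvContains_keys, List.any_eq_false] at hc
          exact absurd (by simp [h] : (q.1 == pvStrip c) = true)
            (hc q.1 (List.mem_map_of_mem hq))
        simp [hq1]
      · simp only [List.map_cons, List.map_nil, List.singleton_append]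
        congr 2
        · rw [List.filter_filter]
          refine congrArg (pvBest c) (List.filter_congr (fun x _ => ?_))
          by_cases hx : pvStrip x = pvStrip c
          · simp [hx, hc]
          · simp [hx]
        · rw [List.filter_filter]
          refine List.filter_congr (fun x _ => ?_)
          rw [pvStepA_contains_new d c (pvStrip x) (by simpa using hc)]
          by_cases hx : pvStrip x = pvStrip c
          · simp [hx]
          · simp [bne, Bool.and_comm]

-- ===== VERDICT (by name: the statement is the Claim_ definition above) =====
theorem build_add_space_pairs_spec : Claim_equal_build_add_space_pairs := by
  intro compounds _
  unfold Spec_build_add_space_pairs build_add_space_pairs build_add_space_pairs_alt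
  show PySem.List.sorted ((List.foldl pvStepA ⟨[]⟩ compounds).items.map _) _ _ = _
  rw [pvFold_items compounds ⟨[]⟩ (by simp)]
  simp [PySem.Dict.contains]
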